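-- pv_equiv track=rewrite | github.com/rysweet/azure-tenant-grapher | src/iac/emitters/terraform/handlers/monitoring/scheduled_query_rules.py | _translate_subscription_ids
-- ===== SOURCE A (Python) =====
-- def _translate_subscription_ids(
--     resource_ids: list[str], target_sub_id: str
-- ) -> list[str]:
--     """Translate subscription IDs in resource IDs for cross-subscription deployment."""
--     translated = []
--     for resource_id in resource_ids:
--         if "/subscriptions/" not in resource_id:
--             translated.append(resource_id)
--             continue
--
--         parts = resource_id.split("/subscriptions/", 1)
--         if len(parts) < 2:
--             translated.append(resource_id)
--             continue
--
--         rest_parts = parts[1].split("/", 1)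
--         if len(rest_parts) > 1:
--             translated.append(f"/subscriptions/{target_sub_id}/{rest_parts[1]}")
--         else:
--             translated.append(resource_id)
--
--     return translated
-- ===== SOURCE B (Python) =====
-- def _rewrite(segs, target_sub_id):
--     # path viewed as '/'-separated segments: the marker is a "subscriptions"
--     # segment that is neither first (needs a '/' before) nor last (needs a '/' after)
--     for k in range(1, len(segs) - 1):
--         if segs[k] == "subscriptions":
--             if k < len(segs) - 2:
--                 return "/".join(["", "subscriptions", target_sub_id, *segs[k + 2:]])
--             return None
--     return None
--
--
-- def _translate_subscription_ids(resource_ids, target_sub_id):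
--     out = []
--     for rid in resource_ids:
--         new = _rewrite(rid.split("/"), target_sub_id)
--         out.append(rid if new is None else new)
--     return out
-- ===== Notes on version B (the rewrite author's own statement) =====
-- stated objective: alternative
-- what changed: B changes the data representation: it splits each resource id into its '/'-separated path segments, scans for a 'subscriptions' segment that has a segment before and after it, and rebuilds the id by joining ['', 'subscriptions', target_sub_id] with the segments after the old subscription id, instead of A's substring split on the literal '/subscriptions/'.
import Mathlib
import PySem

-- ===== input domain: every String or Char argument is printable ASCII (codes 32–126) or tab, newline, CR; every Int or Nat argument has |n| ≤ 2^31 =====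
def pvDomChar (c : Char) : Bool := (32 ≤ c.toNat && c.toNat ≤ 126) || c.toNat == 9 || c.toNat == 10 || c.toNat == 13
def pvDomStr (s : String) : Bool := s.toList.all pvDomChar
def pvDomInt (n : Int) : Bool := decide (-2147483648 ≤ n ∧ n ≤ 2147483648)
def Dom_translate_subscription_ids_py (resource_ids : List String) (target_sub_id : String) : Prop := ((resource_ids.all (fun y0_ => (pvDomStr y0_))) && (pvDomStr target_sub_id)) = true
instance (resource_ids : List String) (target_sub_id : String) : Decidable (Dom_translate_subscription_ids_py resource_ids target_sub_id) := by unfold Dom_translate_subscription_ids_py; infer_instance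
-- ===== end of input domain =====

-- B changes the data representation: it splits each resource id into its '/'-separated path
-- segments, finds a "subscriptions" segment with a segment before and after it, and rejoins
-- with the target subscription id spliced in — same return values (alternative, not claimed faster).


-- the literal "/subscriptions/" (A splits on it) and the segment "subscriptions" (B compares with it)
def pvPat : List Char := "/subscriptions/".toList
def pvSub : List Char := "subscriptions".toList

-- ===== PORT A =====
-- loop body of A for one resource_id (on code points); the separators are non-empty
-- literals, so Python's split(sep, 1) is exactly Chars.splitOnMax _ _ 1 (never raises);
-- parts[1] / rest_parts[1] are guarded by the length tests, so pyGetD's default is unreachable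
def pvA1 (t : List Char) (s : List Char) : List Char :=
  if PySem.Chars.isIn pvPat s = false then s          -- if "/subscriptions/" not in resource_id
  else
    let parts := PySem.Chars.splitOnMax s pvPat 1     -- resource_id.split("/subscriptions/", 1)
    if parts.length < 2 then s
    else
      let rest_parts := PySem.Chars.splitOnMax (PySem.List.pyGetD parts 1 []) ['/'] 1  -- parts[1].split("/", 1)
      if 1 < rest_parts.length then
        pvPat ++ t ++ '/' :: PySem.List.pyGetD rest_parts 1 []   -- f"/subscriptions/{target_sub_id}/{rest_parts[1]}"
      else s

def translate_subscription_ids_py (resource_ids : List String) (target_sub_id : String) : List String :=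
  resource_ids.foldl (fun translated rid => translated ++ [String.ofList (pvA1 target_sub_id.toList rid.toList)]) []

-- ===== PORT B =====
-- B's helper _rewrite: scan segs[k] for k in range(1, len(segs)-1) for "subscriptions";
-- the first hit either yields the rejoined id (when a segment follows the sub id) or None (break)
def pvR (t : List Char) (segs : List (List Char)) (k : Nat) : Option (List Char) :=
  if k < segs.length - 1 then
    if PySem.List.pyGetD segs (k : Int) [] = pvSub then
      if k < segs.length - 2 then
        some (PySem.Chars.join ['/'] ([[], pvSub, t] ++ segs.drop (k + 2)))  -- "/".join(["", "subscriptions", t, *segs[k+2:]])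
      else none
    else pvR t segs (k + 1)
  else none
  termination_by segs.length - k

def translate_subscription_ids_py_alt (resource_ids : List String) (target_sub_id : String) : List String :=
  resource_ids.foldl (fun out rid =>
    out ++ [match pvR target_sub_id.toList (PySem.Chars.splitOn rid.toList ['/']) 1 with
            | none => rid
            | some cs => String.ofList cs]) []

-- ===== PRECONDITION & SPEC =====
def Spec_translate_subscription_ids_py (resource_ids : List String) (target_sub_id : String) (out : List String) : Prop := out = translate_subscription_ids_py_alt resource_ids target_sub_id
instance (resource_ids : List String) (target_sub_id : String) (out : List String) : Decidable (Spec_translate_subscription_ids_py resource_ids target_sub_id out) := by unfold Spec_translate_subscription_ids_py; infer_instance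

-- ===== CLAIM (what is proved, stated in full; the proofs are below) =====
def Claim_equal_translate_subscription_ids_py : Prop := ∀ (resource_ids : List String) (target_sub_id : String), Dom_translate_subscription_ids_py resource_ids target_sub_id → Spec_translate_subscription_ids_py resource_ids target_sub_id (translate_subscription_ids_py resource_ids target_sub_id)

-- ===== LEMMAS AND PROOFS =====

-- "subscriptions/" — pvPat with the leading slash removed (used only by the proofs)
def pvTail : List Char := "subscriptions/".toList

-- option-valued version of A's per-element transform: some = the rewritten id, none = unchanged
def pvCopt (t : List Char) : List Char → Option (List Char)
  | [] => none
  | c :: r =>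
    if pvPat.isPrefixOf (c :: r) then
      (if 0 ≤ PySem.Chars.find ((c :: r).drop 15) ['/'] then
        some (pvPat ++ t ++
          ((c :: r).drop 15).drop (PySem.Chars.find ((c :: r).drop 15) ['/']).toNat)
       else none)
    else pvCopt t r

-- ditto, with the pattern allowed (slash-lessly) at the very start of the string
def pvCopt' (t s : List Char) : Option (List Char) :=
  if pvTail.isPrefixOf s then
    (if 0 ≤ PySem.Chars.find (s.drop 14) ['/'] then
      some (pvPat ++ t ++ (s.drop 14).drop (PySem.Chars.find (s.drop 14) ['/']).toNat)
     else none)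
  else pvCopt t s

-- structural model of s.split("/")
def pvSeg : List Char → List (List Char)
  | [] => [[]]
  | c :: r =>
    if c = '/' then [] :: pvSeg r
    else
      match pvSeg r with
      | [] => [[c]]
      | h :: tl => (c :: h) :: tl

theorem pvSeg_ne_nil (l : List Char) : pvSeg l ≠ [] := by
  cases l with
  | nil => simp [pvSeg]
  | cons c r =>
    by_cases h : c = '/'
    · simp [pvSeg, h]
    · simp only [pvSeg, h, if_false]
      cases pvSeg r <;> simp

-- find.go at offset k is find.go at offset 0, shifted
theorem pv_go_shift (sub : List Char) (l : List Char) (k : Nat) :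
    PySem.Chars.find.go sub l k =
      if PySem.Chars.find.go sub l 0 = -1 then -1 else PySem.Chars.find.go sub l 0 + k := by
  induction l generalizing k with
  | nil =>
    rw [PySem.Chars.find.go.eq_1, PySem.Chars.find.go.eq_1]
    by_cases h : sub.isEmpty <;> simp [h]
  | cons c rest ih =>
    rw [PySem.Chars.find.go.eq_2, PySem.Chars.find.go.eq_2]
    by_cases h : sub.isPrefixOf (c :: rest)
    · simp [h]
    · simp only [h]
      have hb : -1 ≤ PySem.Chars.find.go sub rest 0 := PySem.Chars.neg_one_le_find rest sub
      rw [ih (k + 1), ih 1]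
      split_ifs with h1 <;> push_cast <;> omega

-- cons step for find
theorem pv_find_cons (sub : List Char) (c : Char) (rest : List Char) :
    PySem.Chars.find (c :: rest) sub =
      if sub.isPrefixOf (c :: rest) then 0
      else if PySem.Chars.find rest sub = -1 then -1 else PySem.Chars.find rest sub + 1 := by
  show PySem.Chars.find.go sub (c :: rest) 0 = _
  rw [PySem.Chars.find.go.eq_2]
  by_cases h : sub.isPrefixOf (c :: rest)
  · simp [h]
  · simp only [h]
    rw [pv_go_shift sub rest 1]
    rfl

theorem pv_find_nil (sub : List Char) (h : sub ≠ []) : PySem.Chars.find [] sub = -1 := by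
  show PySem.Chars.find.go sub [] 0 = -1
  rw [PySem.Chars.find.go.eq_1]
  simp [h]

-- after the separator was consumed (maxsplit exhausted) go just returns the remainder
theorem pv_go_zero (sep : List Char) (f : Nat) (l : List Char) (acc : List (List Char)) :
    PySem.Chars.splitOnMax.go sep (f + 1) 0 l [] acc = acc.reverse ++ [l] := by
  cases l <;> simp [PySem.Chars.splitOnMax.go]

-- split(sep, 1) characterised by the position of the FIRST occurrence of sep
theorem pv_go_one (sep : List Char) (hsep : sep ≠ []) :
    ∀ (fuel : Nat) (l cur : List Char) (acc : List (List Char)), l.length < fuel →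
    PySem.Chars.splitOnMax.go sep fuel 1 l cur acc =
      if PySem.Chars.find l sep = -1 then acc.reverse ++ [cur.reverse ++ l]
      else acc.reverse ++ [cur.reverse ++ l.take (PySem.Chars.find l sep).toNat,
                           l.drop ((PySem.Chars.find l sep).toNat + sep.length)] := by
  intro fuel l
  induction l generalizing fuel with
  | nil =>
    intro cur acc hf
    obtain ⟨f, rfl⟩ : ∃ f, fuel = f + 1 := ⟨fuel - 1, by omega⟩
    rw [pv_find_nil sep hsep]
    simp [PySem.Chars.splitOnMax.go]
  | cons c rest ih =>
    intro cur acc hf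
    obtain ⟨f, rfl⟩ : ∃ f, fuel = f + 1 := ⟨fuel - 1, by omega⟩
    by_cases hp : sep.isPrefixOf (c :: rest)
    · have hfc : PySem.Chars.find (c :: rest) sep = 0 := by
        rw [pv_find_cons]; simp [hp]
      obtain ⟨f', rfl⟩ : ∃ f', f = f' + 1 := ⟨f - 1, by simp at hf; omega⟩
      rw [hfc]
      simp only [PySem.Chars.splitOnMax.go, hp, if_true]
      rw [pv_go_zero]
      simp
    · have hfc : PySem.Chars.find (c :: rest) sep =
          if PySem.Chars.find rest sep = -1 then -1 else PySem.Chars.find rest sep + 1 := by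
        rw [pv_find_cons]; simp [hp]
      have hr : rest.length < f := by simp at hf; omega
      simp only [PySem.Chars.splitOnMax.go, hp, Bool.false_eq_true, if_false]
      rw [ih f (c :: cur) acc hr, hfc]
      by_cases h1 : PySem.Chars.find rest sep = -1
      · simp [h1]
      · have h0 : 0 ≤ PySem.Chars.find rest sep := by
          rw [PySem.Chars.find_nonneg_iff, ← PySem.Chars.find_ne_neg_one_iff]; exact h1
        have ht : (PySem.Chars.find rest sep + 1).toNat = (PySem.Chars.find rest sep).toNat + 1 := by omega
        simp only [h1, if_false]
        have hne : ¬ (PySem.Chars.find rest sep + 1 = -1) := by omega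
        rw [if_neg hne, ht]
        have harr : (PySem.Chars.find rest sep).toNat + 1 + sep.length =
            ((PySem.Chars.find rest sep).toNat + sep.length) + 1 := by omega
        rw [harr, List.drop_succ_cons]
        simp [List.take_succ_cons]

theorem pv_splitOnMax_one (s sep : List Char) (hsep : sep ≠ []) :
    PySem.Chars.splitOnMax s sep 1 =
      if PySem.Chars.find s sep = -1 then [s]
      else [s.take (PySem.Chars.find s sep).toNat,
            s.drop ((PySem.Chars.find s sep).toNat + sep.length)] := by
  unfold PySem.Chars.splitOnMax
  rw [if_neg (by omega)]
  simp only [Int.toNat_one]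
  rw [pv_go_one sep hsep (s.length + 1) s [] [] (by omega)]
  split_ifs <;> simp

-- pvCopt characterised by the first occurrence of pvPat
theorem pv_copt_char (t s : List Char) :
    pvCopt t s =
      if 0 ≤ PySem.Chars.find s pvPat then
        (if 0 ≤ PySem.Chars.find (s.drop ((PySem.Chars.find s pvPat).toNat + 15)) ['/'] then
          some (pvPat ++ t ++
            (s.drop ((PySem.Chars.find s pvPat).toNat + 15)).drop
              (PySem.Chars.find (s.drop ((PySem.Chars.find s pvPat).toNat + 15)) ['/']).toNat)
         else none)
      else none := by
  induction s with
  | nil =>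
    rw [pv_find_nil pvPat (by decide)]
    simp [pvCopt]
  | cons c r ih =>
    rw [pv_find_cons]
    by_cases hp : pvPat.isPrefixOf (c :: r)
    · simp only [pvCopt, hp, if_true]
      norm_num
    · simp only [pvCopt, hp, Bool.false_eq_true, if_false, ih]
      by_cases h1 : PySem.Chars.find r pvPat = -1
      · have : ¬ (0 ≤ PySem.Chars.find r pvPat) := by
          have := PySem.Chars.neg_one_le_find r pvPat; omega
        simp [h1]
      · have h0 : 0 ≤ PySem.Chars.find r pvPat := by
          have := PySem.Chars.neg_one_le_find r pvPat; omega
        have h0' : (0:Int) ≤ PySem.Chars.find r pvPat + 1 := by omega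
        have ht : (PySem.Chars.find r pvPat + 1).toNat = (PySem.Chars.find r pvPat).toNat + 1 := by omega
        simp only [h1, if_false, if_pos h0, if_pos h0', ht]
        rw [show (PySem.Chars.find r pvPat).toNat + 1 + 15
              = ((PySem.Chars.find r pvPat).toNat + 15) + 1 by omega, List.drop_succ_cons]

-- A's per-element transform equals the option form
theorem pv_a_copt (t s : List Char) : pvA1 t s = (pvCopt t s).getD s := by
  rw [pv_copt_char]
  unfold pvA1
  by_cases h : PySem.Chars.find s pvPat = -1
  · have hin : PySem.Chars.isIn pvPat s = false := by simp [PySem.Chars.isIn, h]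
    have hneg : ¬ (0 ≤ PySem.Chars.find s pvPat) := by
      have := PySem.Chars.neg_one_le_find s pvPat; omega
    rw [hin, if_pos rfl, if_neg hneg]
    rfl
  · have h0 : 0 ≤ PySem.Chars.find s pvPat := by
      have := PySem.Chars.neg_one_le_find s pvPat; omega
    obtain ⟨n, hfind⟩ : ∃ n : Nat, PySem.Chars.find s pvPat = (n : Int) :=
      ⟨(PySem.Chars.find s pvPat).toNat, by omega⟩
    have hin : PySem.Chars.isIn pvPat s = true := by simp [PySem.Chars.isIn, h]
    have hpatlen : pvPat.length = 15 := by decide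
    rw [if_neg (by simp [hin])]
    rw [pv_splitOnMax_one s pvPat (by decide), hfind]
    have hpts : (if ((n : Int)) = -1 then [s]
        else [List.take ((n : Int)).toNat s, List.drop (((n : Int)).toNat + pvPat.length) s])
        = [List.take n s, List.drop (n + 15) s] := by
      rw [if_neg (by omega)]
      simp [hpatlen]
    rw [hpts, if_neg (by simp)]
    have hparts1 : PySem.List.pyGetD [List.take n s, List.drop (n + 15) s] 1 []
        = List.drop (n + 15) s := by
      simp [PySem.List.pyGetD]
    rw [hparts1, pv_splitOnMax_one (List.drop (n + 15) s) ['/'] (by decide)]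
    simp only [Int.toNat_natCast]
    rw [if_pos (by omega : (0:Int) ≤ (n : Int))]
    by_cases hm : PySem.Chars.find (List.drop (n + 15) s) ['/'] = -1
    · have hneg : ¬ (0 ≤ PySem.Chars.find (List.drop (n + 15) s) ['/']) := by
        have := PySem.Chars.neg_one_le_find (List.drop (n + 15) s) ['/']; omega
      rw [hm, if_pos rfl, if_neg (by simp)]
      rw [if_neg (by omega : ¬ (0:Int) ≤ -1)]
      rfl
    · have hm0 : 0 ≤ PySem.Chars.find (List.drop (n + 15) s) ['/'] := by
        have := PySem.Chars.neg_one_le_find (List.drop (n + 15) s) ['/']; omega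
      obtain ⟨m, hmfind⟩ : ∃ m : Nat,
          PySem.Chars.find (List.drop (n + 15) s) ['/'] = (m : Int) :=
        ⟨(PySem.Chars.find (List.drop (n + 15) s) ['/']).toNat, by omega⟩
      have hslash : ['/'] <+: List.drop m (List.drop (n + 15) s) := by
        have hsp := (PySem.Chars.find_spec (s := List.drop (n + 15) s) (sub := ['/']) hm0).1
        rwa [hmfind, Int.toNat_natCast] at hsp
      rw [hmfind]
      have hpts2 : (if ((m : Int)) = -1 then [List.drop (n + 15) s]
          else [List.take ((m : Int)).toNat (List.drop (n + 15) s),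
                List.drop (((m : Int)).toNat + List.length ['/']) (List.drop (n + 15) s)])
          = [List.take m (List.drop (n + 15) s), List.drop (m + 1) (List.drop (n + 15) s)] := by
        rw [if_neg (by omega)]
        simp
      rw [hpts2, if_pos (by simp), if_pos (by omega : (0:Int) ≤ (m : Int))]
      simp only [Int.toNat_natCast]
      have hget : PySem.List.pyGetD
          [List.take m (List.drop (n + 15) s), List.drop (m + 1) (List.drop (n + 15) s)] 1 []
          = List.drop (m + 1) (List.drop (n + 15) s) := by
        simp [PySem.List.pyGetD]
      rw [hget, Option.getD_some]
      have hcons : List.drop m (List.drop (n + 15) s)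
          = '/' :: List.drop (m + 1) (List.drop (n + 15) s) := by
        obtain ⟨u, hu⟩ := hslash
        have htail : List.drop (m + 1) (List.drop (n + 15) s)
            = (List.drop m (List.drop (n + 15) s)).tail := by
          rw [← List.drop_drop]
          simp
        rw [htail, ← hu]
        simp
      rw [hcons]

-- splitOn.go characterised by pvSeg
theorem pv_splitOn_go (l : List Char) :
    ∀ (fuel : Nat) (cur : List Char) (acc : List (List Char)), l.length < fuel →
    PySem.Chars.splitOn.go ['/'] fuel l cur acc =
      acc.reverse ++ (cur.reverse ++ (pvSeg l).headD []) :: (pvSeg l).tail := by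
  induction l with
  | nil =>
    intro fuel cur acc hf
    obtain ⟨f, rfl⟩ : ∃ f, fuel = f + 1 := ⟨fuel - 1, by omega⟩
    simp [PySem.Chars.splitOn.go, pvSeg]
  | cons c rest ih =>
    intro fuel cur acc hf
    obtain ⟨f, rfl⟩ : ∃ f, fuel = f + 1 := ⟨fuel - 1, by omega⟩
    have hr : rest.length < f := by simp at hf; omega
    by_cases h : c = '/'
    · subst h
      have hp : List.isPrefixOf ['/'] ('/' :: rest) = true := by simp [List.isPrefixOf]
      simp only [PySem.Chars.splitOn.go, hp, if_true]
      rw [show List.drop (List.length ['/']) ('/' :: rest) = rest by simp]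
      rw [ih f [] (cur.reverse :: acc) hr]
      obtain ⟨h0, tl0, he⟩ : ∃ h0 tl0, pvSeg rest = h0 :: tl0 := by
        cases hh : pvSeg rest with
        | nil => exact absurd hh (pvSeg_ne_nil rest)
        | cons a b => exact ⟨a, b, rfl⟩
      simp [pvSeg, he]
    · have hp : List.isPrefixOf ['/'] (c :: rest) = false := by
        simp [List.isPrefixOf, Ne.symm h]
      simp only [PySem.Chars.splitOn.go, hp, Bool.false_eq_true, if_false]
      rw [ih f (c :: cur) acc hr]
      obtain ⟨h0, tl0, he⟩ : ∃ h0 tl0, pvSeg rest = h0 :: tl0 := by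
        cases hh : pvSeg rest with
        | nil => exact absurd hh (pvSeg_ne_nil rest)
        | cons a b => exact ⟨a, b, rfl⟩
      simp [pvSeg, h, he]

theorem pv_splitOn_eq (l : List Char) : PySem.Chars.splitOn l ['/'] = pvSeg l := by
  unfold PySem.Chars.splitOn
  rw [pv_splitOn_go l (l.length + 1) [] [] (by omega)]
  obtain ⟨h0, tl0, he⟩ : ∃ h0 tl0, pvSeg l = h0 :: tl0 := by
    cases hh : pvSeg l with
    | nil => exact absurd hh (pvSeg_ne_nil l)
    | cons a b => exact ⟨a, b, rfl⟩
  simp [he]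

-- joining the segments gives the string back
theorem pv_join_seg (l : List Char) : PySem.Chars.join ['/'] (pvSeg l) = l := by
  induction l with
  | nil => simp [pvSeg, PySem.Chars.join, List.intercalate]
  | cons c r ih =>
    obtain ⟨h0, tl0, he⟩ : ∃ h0 tl0, pvSeg r = h0 :: tl0 := by
      cases hh : pvSeg r with
      | nil => exact absurd hh (pvSeg_ne_nil r)
      | cons a b => exact ⟨a, b, rfl⟩
    rw [he] at ih
    by_cases h : c = '/'
    · subst h
      rw [show pvSeg ('/' :: r) = [] :: pvSeg r by simp [pvSeg], he,
        PySem.Chars.join_cons_cons, ih]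
      simp
    · rw [show pvSeg (c :: r) = (c :: h0) :: tl0 by simp [pvSeg, h, he]]
      cases tl0 with
      | nil =>
        have : PySem.Chars.join ['/'] [h0] = h0 := by
          simp [PySem.Chars.join, List.intercalate]
        rw [this] at ih
        simp [PySem.Chars.join, List.intercalate, ih]
      | cons u v =>
        rw [PySem.Chars.join_cons_cons] at ih ⊢
        rw [List.append_assoc] at ih ⊢
        rw [List.cons_append, ih]

-- no segment contains a slash
theorem pv_seg_slash_free (l : List Char) : ∀ p ∈ pvSeg l, '/' ∉ p := by
  induction l with
  | nil => simp [pvSeg]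
  | cons c r ih =>
    obtain ⟨h0, tl0, he⟩ : ∃ h0 tl0, pvSeg r = h0 :: tl0 := by
      cases hh : pvSeg r with
      | nil => exact absurd hh (pvSeg_ne_nil r)
      | cons a b => exact ⟨a, b, rfl⟩
    by_cases h : c = '/'
    · subst h
      rw [show pvSeg ('/' :: r) = [] :: pvSeg r by simp [pvSeg]]
      intro p hp
      rcases List.mem_cons.mp hp with hp | hp
      · subst hp; simp
      · exact ih p hp
    · rw [show pvSeg (c :: r) = (c :: h0) :: tl0 by simp [pvSeg, h, he]]
      intro p hp
      rcases List.mem_cons.mp hp with hp | hp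
      · subst hp
        intro hm
        rcases List.mem_cons.mp hm with hm | hm
        · exact h hm.symm
        · exact ih h0 (by rw [he]; exact List.mem_cons_self) hm
      · exact ih p (by rw [he]; exact List.mem_cons_of_mem _ hp)

-- prepending a slash-free word plus a slash prepends one segment
theorem pv_seg_prepend (w : List Char) (hw : '/' ∉ w) (r : List Char) :
    pvSeg (w ++ '/' :: r) = w :: pvSeg r := by
  induction w with
  | nil => simp [pvSeg]
  | cons c w' ih =>
    have hc : c ≠ '/' := fun h => hw (by simp [h])
    have hw' : '/' ∉ w' := fun h => hw (List.mem_cons_of_mem _ h)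
    rw [List.cons_append]
    rw [show pvSeg (c :: (w' ++ '/' :: r)) =
        (match pvSeg (w' ++ '/' :: r) with
         | [] => [[c]]
         | h :: tl => (c :: h) :: tl) by simp [pvSeg, hc]]
    rw [ih hw']

-- find of '/' in a slash-free string is -1
theorem pv_find_slash_free (h : List Char) (hh : '/' ∉ h) : PySem.Chars.find h ['/'] = -1 := by
  rw [PySem.Chars.find_eq_neg_one_iff]
  intro hinf
  exact hh (hinf.subset (List.mem_singleton_self '/'))

-- find of '/' after a slash-free prefix
theorem pv_find_after (h : List Char) (hh : '/' ∉ h) (y : List Char) :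
    PySem.Chars.find (h ++ '/' :: y) ['/'] = (h.length : Int) := by
  induction h with
  | nil =>
    rw [List.nil_append, pv_find_cons]
    simp [List.isPrefixOf]
  | cons c h' ih =>
    have hc : c ≠ '/' := fun hx => hh (by simp [hx])
    have hh' : '/' ∉ h' := fun hx => hh (List.mem_cons_of_mem _ hx)
    rw [List.cons_append, pv_find_cons]
    have hp : List.isPrefixOf ['/'] (c :: (h' ++ '/' :: y)) = false := by
      simp [List.isPrefixOf, Ne.symm hc]
    rw [if_neg (by simp [hp]), ih hh']
    rw [if_neg (by omega)]
    push_cast [List.length_cons]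
    omega

-- pvR ignores the head of the segment list: shifting the start index down one
theorem pv_shift (t : List Char) : ∀ (n : Nat) (x : List Char) (T : List (List Char)) (k : Nat),
    T.length - k = n → pvR t (x :: T) (k + 1) = pvR t T k := by
  intro n
  induction n with
  | zero =>
    intro x T k hn
    conv_lhs => rw [pvR.eq_def]
    conv_rhs => rw [pvR.eq_def]
    rw [if_neg (by simp; omega), if_neg (by omega)]
  | succ n ih =>
    intro x T k hn
    conv_lhs => rw [pvR.eq_def]
    conv_rhs => rw [pvR.eq_def]
    by_cases h1 : k < T.length - 1
    · rw [if_pos (by simp; omega), if_pos h1]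
      have hget : PySem.List.pyGetD (x :: T) ((k + 1 : Nat) : Int) []
          = PySem.List.pyGetD T ((k : Nat) : Int) [] := by
        rw [PySem.List.pyGetD_natCast, PySem.List.pyGetD_natCast]
        simp
      rw [hget]
      by_cases h2 : PySem.List.pyGetD T ((k : Nat) : Int) [] = pvSub
      · rw [if_pos h2, if_pos h2]
        by_cases h3 : k < T.length - 2
        · rw [if_pos (by simp; omega), if_pos h3]
          rw [show k + 1 + 2 = (k + 2) + 1 by ring, List.drop_succ_cons]
        · rw [if_neg (by simp; omega), if_neg h3]
      · rw [if_neg h2, if_neg h2]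
        exact ih x T (k + 1) (by omega)
    · rw [if_neg (by simp; omega), if_neg h1]

-- the heart of the B side: pvR over the segments equals the option forms
theorem pv_main (s : List Char) (t : List Char) :
    pvR t (pvSeg s) 1 = pvCopt t s ∧ pvR t (pvSeg s) 0 = pvCopt' t s := by
  induction s with
  | nil =>
    constructor
    · rw [show pvSeg [] = [[]] by simp [pvSeg], pvR.eq_def]
      rw [if_neg (by simp)]
      simp [pvCopt]
    · rw [show pvSeg [] = [[]] by simp [pvSeg], pvR.eq_def]
      rw [if_neg (by simp)]
      rw [pvCopt']
      rw [if_neg (by decide)]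
      simp [pvCopt]
  | cons c r ih =>
    have part1 : pvR t (pvSeg (c :: r)) 1 = pvCopt t (c :: r) := by
      by_cases h : c = '/'
      · subst h
        rw [show pvSeg ('/' :: r) = [] :: pvSeg r by simp [pvSeg]]
        have h01 : pvR t ([] :: pvSeg r) 1 = pvR t (pvSeg r) 0 :=
          pv_shift t _ [] (pvSeg r) 0 rfl
        rw [h01, ih.2]
        rw [pvCopt']
        have hiff : pvPat.isPrefixOf ('/' :: r) = pvTail.isPrefixOf r := by
          rw [show pvPat = '/' :: pvTail by decide]
          simp [List.isPrefixOf]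
        by_cases hp : pvTail.isPrefixOf r = true
        · rw [if_pos hp]
          rw [show pvCopt t ('/' :: r) =
            (if 0 ≤ PySem.Chars.find (('/' :: r).drop 15) ['/'] then
              some (pvPat ++ t ++
                (('/' :: r).drop 15).drop (PySem.Chars.find (('/' :: r).drop 15) ['/']).toNat)
             else none) by
              simp only [pvCopt]; rw [if_pos (by rw [hiff]; exact hp)]]
          rw [show ('/' :: r).drop 15 = r.drop 14 by
            rw [show (15:Nat) = 14+1 by rfl, List.drop_succ_cons]]
        · rw [if_neg hp]
          rw [show pvCopt t ('/' :: r) = pvCopt t r by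
            simp only [pvCopt]; rw [if_neg (by rw [hiff]; simpa using hp)]]
      · obtain ⟨h0, tl0, he⟩ : ∃ h0 tl0, pvSeg r = h0 :: tl0 := by
          cases hh : pvSeg r with
          | nil => exact absurd hh (pvSeg_ne_nil r)
          | cons a b => exact ⟨a, b, rfl⟩
        rw [show pvSeg (c :: r) = (c :: h0) :: tl0 by simp [pvSeg, h, he]]
        have h01 : pvR t ((c :: h0) :: tl0) 1 = pvR t tl0 0 :=
          pv_shift t _ (c :: h0) tl0 0 rfl
        have h01' : pvR t (h0 :: tl0) 1 = pvR t tl0 0 :=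
          pv_shift t _ h0 tl0 0 rfl
        have := ih.1
        rw [he, h01'] at this
        rw [h01, this]
        rw [show pvCopt t (c :: r) = pvCopt t r by
          simp only [pvCopt]
          rw [if_neg (by
            rw [show pvPat = '/' :: pvTail by decide]
            simp [List.isPrefixOf, Ne.symm h])]]
    refine ⟨part1, ?_⟩
    rw [pvCopt']
    by_cases hp : pvTail.isPrefixOf (c :: r) = true
    · -- the string begins "subscriptions/"
      have hpre : pvTail <+: (c :: r) := List.isPrefixOf_iff_prefix.mp hp
      obtain ⟨rest, hrest⟩ := hpre
      have hres : (c :: r).drop 14 = rest := by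
        rw [← hrest, show (14 : Nat) = pvTail.length by decide, List.drop_left]
      have hseg : pvSeg (c :: r) = pvSub :: pvSeg rest := by
        rw [← hrest, show pvTail = pvSub ++ ['/'] by decide, List.append_assoc,
          List.singleton_append]
        exact pv_seg_prepend pvSub (by decide) rest
      obtain ⟨h0, tl0, he⟩ : ∃ h0 tl0, pvSeg rest = h0 :: tl0 := by
        cases hh : pvSeg rest with
        | nil => exact absurd hh (pvSeg_ne_nil rest)
        | cons a b => exact ⟨a, b, rfl⟩
      rw [if_pos hp, hseg, he, pvR.eq_def]
      rw [if_pos (by simp)]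
      rw [show PySem.List.pyGetD (pvSub :: h0 :: tl0) ((0:Nat) : Int) [] = pvSub by
        rw [PySem.List.pyGetD_natCast]; simp]
      rw [if_pos rfl]
      cases tl0 with
      | nil =>
        -- only the sub id follows: no slash after it, unchanged on both sides
        rw [if_neg (by simp)]
        have hrrest : rest = h0 := by
          have hj := pv_join_seg rest
          rw [he] at hj
          simpa [PySem.Chars.join, List.intercalate] using hj.symm
        have hfree : '/' ∉ h0 := pv_seg_slash_free rest h0 (by rw [he]; simp)
        rw [hres, hrrest, pv_find_slash_free h0 hfree]
        rw [if_neg (by omega)]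
      | cons u v =>
        rw [if_pos (by simp)]
        have hfree : '/' ∉ h0 := pv_seg_slash_free rest h0 (by rw [he]; simp)
        have hrrest : rest = h0 ++ '/' :: PySem.Chars.join ['/'] (u :: v) := by
          have hj := pv_join_seg rest
          rw [he, PySem.Chars.join_cons_cons] at hj
          rw [← hj]
          simp
        rw [hres, hrrest, pv_find_after h0 hfree]
        rw [if_pos (by omega : (0:Int) ≤ (h0.length : Int))]
        rw [Int.toNat_natCast]
        rw [List.drop_left]
        refine congrArg some ?_
        rw [show List.drop (0 + 2) (pvSub :: h0 :: u :: v) = u :: v from rfl]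
        rw [show ([[], pvSub, t] ++ u :: v : List (List Char)) = [] :: pvSub :: t :: u :: v from rfl]
        rw [PySem.Chars.join_cons_cons, PySem.Chars.join_cons_cons, PySem.Chars.join_cons_cons]
        rw [show pvPat = '/' :: (pvSub ++ ['/']) by decide]
        simp
    · -- no match at position 0: fall through to the scan from 1
      rw [if_neg hp]
      obtain ⟨h0, tl0, he⟩ : ∃ h0 tl0, pvSeg (c :: r) = h0 :: tl0 := by
        cases hh : pvSeg (c :: r) with
        | nil => exact absurd hh (pvSeg_ne_nil (c :: r))
        | cons a b => exact ⟨a, b, rfl⟩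
      have hstep : pvR t (h0 :: tl0) 0 = pvR t (h0 :: tl0) 1 := by
        conv_lhs => rw [pvR.eq_def]
        by_cases h1 : 0 < (h0 :: tl0).length - 1
        · rw [if_pos h1]
          have hget : PySem.List.pyGetD (h0 :: tl0) ((0:Nat) : Int) [] = h0 := by
            rw [PySem.List.pyGetD_natCast]; simp
          have hne : h0 ≠ pvSub := by
            intro hq
            obtain ⟨u, v, htl⟩ : ∃ u v, tl0 = u :: v := by
              cases tl0 with
              | nil => simp at h1
              | cons a b => exact ⟨a, b, rfl⟩
            have hj := pv_join_seg (c :: r)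
            rw [he, htl, hq, PySem.Chars.join_cons_cons] at hj
            apply hp
            rw [List.isPrefixOf_iff_prefix]
            rw [← hj, show pvTail = pvSub ++ ['/'] by decide]
            rw [List.append_assoc, List.singleton_append]
            exact ⟨PySem.Chars.join ['/'] (u :: v), rfl⟩
          rw [hget, if_neg hne]
        · rw [if_neg h1]
          conv_rhs => rw [pvR.eq_def]
          rw [if_neg (by simp only [List.length_cons] at h1 ⊢; omega)]
      rw [he, hstep, ← he, part1]

-- ===== VERDICT (by name: the statement is the Claim_ definition above) =====
theorem translate_subscription_ids_py_spec : Claim_equal_translate_subscription_ids_py := by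
  intro resource_ids target_sub_id _
  unfold Spec_translate_subscription_ids_py translate_subscription_ids_py translate_subscription_ids_py_alt
  rw [PySem.List.foldl_append_singleton_eq_map, PySem.List.foldl_append_singleton_eq_map]
  apply List.map_congr_left
  intro rid _
  rw [pv_a_copt, pv_splitOn_eq, (pv_main rid.toList target_sub_id.toList).1]
  cases h : pvCopt target_sub_id.toList rid.toList with
  | none => simp
  | some cs => simp
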